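-- pv_equiv track=rewrite | github.com/kbak/local-ai-stack | voice-agent/app/main.py | _carve_sentence
-- ===== SOURCE A (Python) =====
-- MIN_SENTENCE_CHARS = 12
--
-- MAX_SENTENCE_CHARS = 350
--
-- _SENTENCE_ENDERS = (".", "!", "?", "\n")
--
-- def _carve_sentence(buf: str) -> tuple[str | None, str]:
--     """Pull one ready-to-speak sentence off the front of buf.
--
--     Returns (sentence, remainder). sentence is None if nothing is ready yet.
--     A sentence is 'ready' when we see a terminator after >= MIN_SENTENCE_CHARS,
--     or the buffer grows past MAX_SENTENCE_CHARS (force a break).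
--     """
--     if not buf:
--         return None, buf
--
--     for i, ch in enumerate(buf):
--         if ch in _SENTENCE_ENDERS and i + 1 >= MIN_SENTENCE_CHARS:
--             # Include trailing whitespace in the sentence we emit; skip for remainder.
--             j = i + 1
--             while j < len(buf) and buf[j].isspace():
--                 j += 1
--             return buf[:j].strip(), buf[j:]
--
--     if len(buf) >= MAX_SENTENCE_CHARS:
--         # Force a break on the last whitespace to avoid mid-word cuts.
--         cut = buf.rfind(" ", MIN_SENTENCE_CHARS, MAX_SENTENCE_CHARS)
--         if cut == -1:
--             cut = MAX_SENTENCE_CHARS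
--         return buf[:cut].strip(), buf[cut:].lstrip()
--
--     return None, buf
-- ===== SOURCE B (Python) =====
-- MIN_SENTENCE_CHARS = 12
--
-- MAX_SENTENCE_CHARS = 350
--
-- _SENTENCE_ENDERS = (".", "!", "?", "\n")
--
-- def _carve_sentence(buf):
--     """Find the earliest qualifying terminator via per-ender str.find instead of a
--     character-by-character scan, then carve the same way."""
--     if not buf:
--         return None, buf
--
--     hits = [p for p in (buf.find(e, MIN_SENTENCE_CHARS - 1) for e in _SENTENCE_ENDERS)
--             if p != -1]
--     if hits:
--         j = min(hits) + 1
--         while j < len(buf) and buf[j].isspace():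
--             j += 1
--         return buf[:j].strip(), buf[j:]
--
--     if len(buf) >= MAX_SENTENCE_CHARS:
--         cut = buf.rfind(" ", MIN_SENTENCE_CHARS, MAX_SENTENCE_CHARS)
--         if cut == -1:
--             cut = MAX_SENTENCE_CHARS
--         return buf[:cut].strip(), buf[cut:].lstrip()
--
--     return None, buf
-- ===== Notes on version B (the rewrite author's own statement) =====
-- stated objective: faster
-- what changed: Replaces A's character-by-character enumerate scan for the first qualifying terminator with one str.find(ender, MIN_SENTENCE_CHARS-1) per terminator, taking the minimum of the found hits; the whitespace skip and the force-break branch are unchanged.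
import Mathlib
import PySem

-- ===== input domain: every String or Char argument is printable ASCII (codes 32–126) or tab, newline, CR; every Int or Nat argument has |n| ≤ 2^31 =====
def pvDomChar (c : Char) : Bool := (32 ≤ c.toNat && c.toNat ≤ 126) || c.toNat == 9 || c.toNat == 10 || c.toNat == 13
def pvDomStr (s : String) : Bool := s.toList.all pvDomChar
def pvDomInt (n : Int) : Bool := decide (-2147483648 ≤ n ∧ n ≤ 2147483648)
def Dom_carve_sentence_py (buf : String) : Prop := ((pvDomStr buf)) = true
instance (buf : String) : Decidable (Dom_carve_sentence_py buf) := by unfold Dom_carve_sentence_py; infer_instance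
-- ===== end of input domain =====

-- B replaces A's character-by-character scan with one str.find per terminator (min of the
-- qualifying hits); measured faster by a constant factor, same exact return value.

-- ===== PORT A =====

-- ch in _SENTENCE_ENDERS (each ender is a 1-char string, ch a 1-char string: char equality)
def pvIsEnder (ch : Char) : Bool := ch == '.' || ch == '!' || ch == '?' || ch == '\n'

-- the 'for i, ch in enumerate(buf)' loop with its early return: first i with the condition
def pvScanA : List Char → Nat → Option Nat
  | [], _ => none
  | ch :: rest, i => if pvIsEnder ch && decide (12 ≤ i + 1) then some i else pvScanA rest (i + 1)

-- 'while j < len(buf) and buf[j].isspace(): j += 1'  (shared: both A and B contain this loop verbatim)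
def pvSkipWs (l : List Char) (j : Nat) : Nat :=
  if h : j < l.length then
    if PySem.Chars.isspace l[j] then pvSkipWs l (j + 1) else j
  else j
termination_by l.length - j

def carve_sentence_py (buf : String) : Option String × String :=
  if buf.toList = [] then (none, buf)
  else
    match pvScanA buf.toList 0 with
    | some i =>
        let j := pvSkipWs buf.toList (i + 1)
        (some (String.ofList (PySem.Chars.strip (PySem.List.slice buf.toList none (some (j : Int))))),
         String.ofList (PySem.List.slice buf.toList (some (j : Int)) none))
    | none =>
        if 350 ≤ buf.toList.length then
          let cut := PySem.Chars.rfindFrom buf.toList [' '] 12 (some 350)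
          let cut2 := if cut = -1 then 350 else cut
          (some (String.ofList (PySem.Chars.strip (PySem.List.slice buf.toList none (some cut2)))),
           String.ofList (PySem.Chars.lstrip (PySem.List.slice buf.toList (some cut2) none)))
        else (none, buf)

-- ===== PORT B =====

def carve_sentence_py_alt (buf : String) : Option String × String :=
  if buf.toList = [] then (none, buf)
  else
    match PySem.List.min?
        ((([".", "!", "?", "\n"].map (fun e => PySem.Str.findFrom buf e 11 none)).filter
          (fun p => p != -1))) (fun x => x) with
    | some m =>
        let j := pvSkipWs buf.toList (m.toNat + 1)
        (some (String.ofList (PySem.Chars.strip (PySem.List.slice buf.toList none (some (j : Int))))),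
         String.ofList (PySem.List.slice buf.toList (some (j : Int)) none))
    | none =>
        if 350 ≤ buf.toList.length then
          let cut := PySem.Chars.rfindFrom buf.toList [' '] 12 (some 350)
          let cut2 := if cut = -1 then 350 else cut
          (some (String.ofList (PySem.Chars.strip (PySem.List.slice buf.toList none (some cut2)))),
           String.ofList (PySem.Chars.lstrip (PySem.List.slice buf.toList (some cut2) none)))
        else (none, buf)

-- ===== PRECONDITION & SPEC =====
def Spec_carve_sentence_py (buf : String) (out : Option String × String) : Prop := out = carve_sentence_py_alt buf
instance (buf : String) (out : Option String × String) : Decidable (Spec_carve_sentence_py buf out) := by unfold Spec_carve_sentence_py; infer_instance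

-- ===== CLAIM (what is proved, stated in full; the proofs are below) =====
def Claim_equal_carve_sentence_py : Prop := ∀ (buf : String), Dom_carve_sentence_py buf → Spec_carve_sentence_py buf (carve_sentence_py buf)

-- ===== LEMMAS AND PROOFS =====

def pvToInt : Option Nat → Int
  | none => -1
  | some n => n

def pvOptMin : Option Nat → Option Nat → Option Nat
  | none, b => b
  | some a, none => some a
  | some a, some b => some (min a b)

lemma pvScanA_ge (l : List Char) (k : Nat) (hk : 11 ≤ k) :
    pvScanA l k = (l.findIdx? pvIsEnder).map (· + k) := by
  induction l generalizing k with
  | nil => rfl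
  | cons ch rest ih =>
      simp only [pvScanA, List.findIdx?_cons]
      by_cases h : pvIsEnder ch
      · simp [h, show 12 ≤ k + 1 by omega]
      · rw [if_neg (by simp [h]), if_neg (by simp [h]), ih (k + 1) (by omega)]
        cases rest.findIdx? pvIsEnder <;> simp <;> omega

lemma pvScanA_eq (l : List Char) (k : Nat) (hk : k ≤ 11) :
    pvScanA l k = ((l.drop (11 - k)).findIdx? pvIsEnder).map (· + 11) := by
  induction l generalizing k with
  | nil => simp [pvScanA]
  | cons ch rest ih =>
      rcases Nat.lt_or_ge k 11 with h | h
      · have hd : (ch :: rest).drop (11 - k) = rest.drop (11 - (k + 1)) := by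
          have : 11 - k = (11 - (k + 1)) + 1 := by omega
          rw [this]; rfl
        rw [hd]
        simp only [pvScanA]
        rw [if_neg (by intro hcon; simp [Bool.and_eq_true] at hcon; omega)]
        exact ih (k + 1) (by omega)
      · have hk11 : k = 11 := by omega
        subst hk11
        rw [pvScanA_ge _ _ le_rfl]
        simp

lemma pvSingPrefix (c : Char) (xs : List Char) : [c] <+: xs ↔ xs.head? = some c := by
  cases xs with
  | nil => simp
  | cons x t => simp [List.cons_prefix_iff, eq_comm]

lemma pvFindSingle (d : List Char) (c : Char) :
    PySem.Chars.find d [c] = pvToInt (d.findIdx? (· == c)) := by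
  cases hf : d.findIdx? (· == c) with
  | none =>
      have hnm : c ∉ d := by
        intro hc
        have := (List.findIdx?_eq_none_iff.mp hf) c hc
        simp at this
      rw [(PySem.Chars.find_eq_neg_one_iff d [c]).mpr]
      · rfl
      · rw [List.singleton_infix_iff]; exact hnm
  | some k =>
      obtain ⟨hk, hfi⟩ := List.findIdx?_eq_some_iff_findIdx_eq.mp hf
      have hdk : d[k] = c := by
        have := List.findIdx_getElem (p := (· == c)) (xs := d) (w := by omega)
        simpa [hfi] using this
      have hmem : c ∈ d := hdk ▸ List.getElem_mem hk
      have hpos : 0 ≤ PySem.Chars.find d [c] := by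
        rw [PySem.Chars.find_nonneg_iff, List.singleton_infix_iff]; exact hmem
      obtain ⟨hpre, hmin⟩ := PySem.Chars.find_spec hpos
      set f := (PySem.Chars.find d [c]).toNat with hfd
      -- f ≤ k : minimality of find
      have hk_occ : [c] <+: d.drop k := by
        rw [pvSingPrefix, List.head?_drop]
        simp [hdk, hk]
      have hfk : f ≤ k := by
        by_contra hlt
        exact hmin k (by omega) hk_occ
      -- k ≤ f : minimality of findIdx
      have hf_occ : d[f]? = some c := by
        rw [← List.head?_drop]
        rw [pvSingPrefix] at hpre
        exact hpre
      have hkf : k ≤ f := by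
        by_contra hlt
        have hflen : f < d.length := by
          rcases List.getElem?_eq_some_iff.mp hf_occ with ⟨h1, _⟩
          exact h1
        have := List.not_of_lt_findIdx (p := (· == c)) (xs := d) (i := f) (by omega)
        rcases List.getElem?_eq_some_iff.mp hf_occ with ⟨h1, h2⟩
        simp at this
        exact this h2
      have : f = k := by omega
      have : PySem.Chars.find d [c] = (k : Int) := by
        rw [← Int.toNat_of_nonneg hpos, ← hfd, this]
      simp [this, pvToInt]

lemma pvFindFromSmall (l : List Char) (c : Char) (h : l.length < 11) :
    PySem.Chars.findFrom l [c] 11 none = -1 := by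
  simp only [PySem.Chars.findFrom]
  rw [if_pos (by push_cast; omega)]

lemma pvF (c : Char) (l : List Char) :
    PySem.Chars.findFrom l [c] 11 none =
      pvToInt (((l.drop 11).findIdx? (· == c)).map (· + 11)) := by
  by_cases h : 11 ≤ l.length
  · rw [show (11 : Int) = ((11 : Nat) : Int) from rfl,
       PySem.Chars.findFrom_natCast l [c] 11 h, pvFindSingle]
    cases hf : (l.drop 11).findIdx? (· == c) with
    | none => simp [pvToInt]
    | some k =>
        rw [if_neg (by simp [pvToInt])]
        simp [pvToInt]
        omega
  · rw [pvFindFromSmall l c (by omega), List.drop_eq_nil_of_le (by omega)]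
    rfl

lemma pvFindIdxOr (p q : Char → Bool) (d : List Char) :
    d.findIdx? (fun ch => p ch || q ch) = pvOptMin (d.findIdx? p) (d.findIdx? q) := by
  induction d with
  | nil => rfl
  | cons x t ih =>
      simp only [List.findIdx?_cons]
      by_cases hp : p x
      · by_cases hq : q x
        · simp [hp, hq, pvOptMin]
        · simp only [hp, hq, Bool.true_or, if_true]
          cases t.findIdx? q <;> simp [pvOptMin]
      · by_cases hq : q x
        · simp only [hp, hq, Bool.false_or, if_true]
          cases t.findIdx? p <;> simp [pvOptMin]
        · simp only [hp, hq, Bool.false_or]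
          rw [ih]
          cases t.findIdx? p <;> cases t.findIdx? q <;> simp [pvOptMin] <;> omega

lemma pvOptMinMapAdd (a b : Option Nat) :
    pvOptMin (a.map (· + 11)) (b.map (· + 11)) = (pvOptMin a b).map (· + 11) := by
  cases a <;> cases b <;> simp [pvOptMin] <;> omega

lemma pvFiltMap (L : List (Option Nat)) :
    (L.map pvToInt).filter (fun p => p != -1) = (L.filterMap id).map (fun (n : Nat) => (n : Int)) := by
  induction L with
  | nil => rfl
  | cons o t ih =>
      cases o with
      | none => simpa [pvToInt] using ih
      | some n =>
          simp only [List.map_cons, List.filterMap_cons, List.filter_cons]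
          rw [if_pos (by simp [pvToInt])]
          simp [ih, pvToInt]

lemma pvFoldSome (t : List (Option Nat)) (n : Nat) :
    t.foldl pvOptMin (some n) = some ((t.filterMap id).foldl min n) := by
  induction t generalizing n with
  | nil => rfl
  | cons o r ih =>
      cases o with
      | none => simpa using ih n
      | some m => simpa [pvOptMin] using ih (min n m)

lemma pvFoldNone (L : List (Option Nat)) :
    L.foldl pvOptMin none =
      match L.filterMap id with
      | [] => none
      | v :: t => some (t.foldl min v) := by
  induction L with
  | nil => rfl
  | cons o t ih =>
      cases o with
      | none => simpa using ih
      | some n => simp [pvFoldSome, pvOptMin]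

lemma pvCastFold (t : List Nat) (v : Nat) :
    (t.map (fun (n : Nat) => (n : Int))).foldl min (v : Int) = ((t.foldl min v : Nat) : Int) := by
  induction t generalizing v with
  | nil => rfl
  | cons m r ih =>
      rw [List.map_cons, List.foldl_cons,
        show min ((v : Int)) ((m : Int)) = ((min v m : Nat) : Int) from by push_cast; rfl]
      exact ih (min v m)

lemma pvBminGen (L : List (Option Nat)) :
    PySem.List.min? ((L.map pvToInt).filter (fun p => p != -1)) (fun x => x) =
      (L.foldl pvOptMin none).map (fun (n : Nat) => (n : Int)) := by
  rw [pvFiltMap, pvFoldNone]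
  cases hL : L.filterMap id with
  | nil => simp
  | cons v t =>
      simp only [List.map_cons, PySem.List.min?_id_cons, pvCastFold, Option.map_some]

lemma pvBmin4 (o1 o2 o3 o4 : Option Nat) :
    PySem.List.min? (([pvToInt o1, pvToInt o2, pvToInt o3, pvToInt o4]).filter (fun p => p != -1)) (fun x => x) =
      (pvOptMin (pvOptMin (pvOptMin o1 o2) o3) o4).map (fun (n : Nat) => (n : Int)) := by
  have := pvBminGen [o1, o2, o3, o4]
  simpa [List.foldl] using this

lemma pvMain (buf : String) :
    PySem.List.min?
        ((([".", "!", "?", "\n"].map (fun e => PySem.Str.findFrom buf e 11 none)).filter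
          (fun p => p != -1))) (fun x => x) =
      (pvScanA buf.toList 0).map (fun (n : Nat) => (n : Int)) := by
  have h1 : (".").toList = ['.'] := rfl
  have h2 : ("!").toList = ['!'] := rfl
  have h3 : ("?").toList = ['?'] := rfl
  have h4 : ("\n").toList = ['\n'] := rfl
  simp only [List.map_cons, List.map_nil, PySem.Str.findFrom_eq, h1, h2, h3, h4,
    pvF _ buf.toList]
  rw [pvBmin4]
  rw [pvOptMinMapAdd, pvOptMinMapAdd, pvOptMinMapAdd]
  rw [pvScanA_eq buf.toList 0 (by omega)]
  simp only [Nat.sub_zero]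
  have hU : (buf.toList.drop 11).findIdx? pvIsEnder =
      pvOptMin (pvOptMin (pvOptMin ((buf.toList.drop 11).findIdx? (· == '.'))
        ((buf.toList.drop 11).findIdx? (· == '!'))) ((buf.toList.drop 11).findIdx? (· == '?')))
        ((buf.toList.drop 11).findIdx? (· == '\n')) := by
    have e1 := pvFindIdxOr (fun ch => ch == '.' || ch == '!' || ch == '?') (fun ch => ch == '\n')
      (buf.toList.drop 11)
    have e2 := pvFindIdxOr (fun ch => ch == '.' || ch == '!') (fun ch => ch == '?')
      (buf.toList.drop 11)
    have e3 := pvFindIdxOr (fun ch => ch == '.') (fun ch => ch == '!') (buf.toList.drop 11)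
    calc (buf.toList.drop 11).findIdx? pvIsEnder
        = (buf.toList.drop 11).findIdx? (fun ch => (ch == '.' || ch == '!' || ch == '?') || ch == '\n') := rfl
      _ = _ := by rw [e1, e2, e3]
  rw [hU]

-- ===== VERDICT (by name: the statement is the Claim_ definition above) =====
theorem carve_sentence_py_spec : Claim_equal_carve_sentence_py := by
  intro buf _
  unfold Spec_carve_sentence_py carve_sentence_py carve_sentence_py_alt
  by_cases hnil : buf.toList = []
  · simp [hnil]
  · rw [if_neg hnil, if_neg hnil, pvMain buf]
    cases hs : pvScanA buf.toList 0 with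
    | none => rfl
    | some i => simp
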